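-- pv_equiv track=rewrite | github.com/numba/numba | numba/targets/timsort.py | gallop_left
-- ===== SOURCE A (Python) =====
-- def LT(a, b):
--     """
--     Trivial comparison function between two keys.  This is factored out to
--     make it clear where comparison occurs.
--     """
--     return a < b
--
-- def gallop_left(key, a, start, stop, hint):
--     """
--     Locate the proper position of key in a sorted vector; if the vector contains
--     an element equal to key, return the position immediately to the left of
--     the leftmost equal element.  [gallop_right() does the same except returns
--     the position to the right of the rightmost equal element (if any).]
--
--     "a" is a sorted vector with stop elements, starting at a[start].
--     stop must be > start.
--
--     "hint" is an index at which to begin the search, start <= hint < stop.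
--     The closer hint is to the final result, the faster this runs.
--
--     The return value is the int k in start..stop such that
--
--         a[k-1] < key <= a[k]
--
--     pretending that a[start-1] is minus infinity and a[stop] is plus infinity.
--     IOW, key belongs at index k; or, IOW, the first k elements of a should
--     precede key, and the last stop-start-k should follow key.
--
--     See listsort.txt for info on the method.
--     """
--     assert stop > start, "gallop_left(): stop <= start"
--     assert hint >= start and hint < stop, "gallop_left(): hint not in [start, stop)"
--     n = stop - start
--
--     # First, gallop from the hint to find a "good" subinterval for bisecting
--     lastofs = 0
--     ofs = 1
--     if LT(a[hint], key):
--         # a[hint] < key => gallop right, until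
--         #                  a[hint + lastofs] < key <= a[hint + ofs]
--         maxofs = stop - hint
--         while ofs < maxofs:
--             if LT(a[hint + ofs], key):
--                 lastofs = ofs
--                 ofs = (ofs << 1) + 1
--                 if ofs <= 0:
--                     # Int overflow
--                     ofs = maxofs
--             else:
--                 # key <= a[hint + ofs]
--                 break
--         if ofs > maxofs:
--             ofs = maxofs
--         # Translate back to offsets relative to a[0]
--         lastofs += hint
--         ofs += hint
--     else:
--         # key <= a[hint] => gallop left, until
--         #                   a[hint - ofs] < key <= a[hint - lastofs]
--         maxofs = hint - start + 1
--         while ofs < maxofs: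
--             if LT(a[hint - ofs], key):
--                 break
--             else:
--                 # key <= a[hint - ofs]
--                 lastofs = ofs
--                 ofs = (ofs << 1) + 1
--                 if ofs <= 0:
--                     # Int overflow
--                     ofs = maxofs
--         if ofs > maxofs:
--             ofs = maxofs
--         # Translate back to positive offsets relative to a[0]
--         lastofs, ofs = hint - ofs, hint - lastofs
--
--     assert start - 1 <= lastofs and lastofs < ofs and ofs <= stop
--     # Now a[lastofs] < key <= a[ofs], so key belongs somewhere to the
--     # right of lastofs but no farther right than ofs.  Do a binary
--     # search, with invariant a[lastofs-1] < key <= a[ofs].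
--     lastofs += 1
--     while lastofs < ofs:
--         m = lastofs + ((ofs - lastofs) >> 1)
--         if LT(a[m], key):
--             # a[m] < key
--             lastofs = m + 1
--         else:
--             # key <= a[m]
--             ofs = m
--     # Now lastofs == ofs, so a[ofs - 1] < key <= a[ofs]
--     return ofs
-- ===== SOURCE B (Python) =====
-- def gallop_left(key, a, start, stop, hint):
--     """
--     Left insertion point of key in the sorted vector a over [start, stop),
--     probing outward from hint.  Same probe sequence as the classic two-loop
--     gallop, but written as one direction-parameterised scan over the
--     closed-form offsets 2**k - 1, followed by a recursive bisection.
--     """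
--     assert stop > start, "gallop_left(): stop <= start"
--     assert hint >= start and hint < stop, "gallop_left(): hint not in [start, stop)"
--     if a[hint] < key:
--         d, maxofs = 1, stop - hint          # key is to the right of hint
--     else:
--         d, maxofs = -1, hint - start + 1    # key is at or to the left of hint
--     k = 0
--     while 2 ** (k + 1) - 1 < maxofs and (a[hint + d * (2 ** (k + 1) - 1)] < key) == (d == 1):
--         k += 1
--     last = 2 ** k - 1
--     ofs = min(2 ** (k + 1) - 1, maxofs)
--     if d == 1:
--         lo, hi = hint + last + 1, hint + ofs
--     else:
--         lo, hi = hint - ofs + 1, hint - last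
--
--     def bisect(lo, hi):
--         if lo >= hi:
--             return lo
--         m = lo + (hi - lo) // 2
--         if a[m] < key:
--             return bisect(m + 1, hi)
--         return bisect(lo, m)
--
--     return bisect(lo, hi)
-- ===== Notes on version B (the rewrite author's own statement) =====
-- stated objective: alternative
-- what changed: Same galloping probe sequence, but decomposed differently: the two mirrored stateful gallop loops (lastofs/ofs doubling with an overflow clamp) become one direction-parameterised counting loop over the closed-form offsets 2**k - 1, and the iterative bisection becomes a recursive helper.
-- outside the precondition, e.g. on gallop_left(5, [8, -27, -1, 1, 187], 0, 106, 1): A returns 4, B returns 4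
import Mathlib
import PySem

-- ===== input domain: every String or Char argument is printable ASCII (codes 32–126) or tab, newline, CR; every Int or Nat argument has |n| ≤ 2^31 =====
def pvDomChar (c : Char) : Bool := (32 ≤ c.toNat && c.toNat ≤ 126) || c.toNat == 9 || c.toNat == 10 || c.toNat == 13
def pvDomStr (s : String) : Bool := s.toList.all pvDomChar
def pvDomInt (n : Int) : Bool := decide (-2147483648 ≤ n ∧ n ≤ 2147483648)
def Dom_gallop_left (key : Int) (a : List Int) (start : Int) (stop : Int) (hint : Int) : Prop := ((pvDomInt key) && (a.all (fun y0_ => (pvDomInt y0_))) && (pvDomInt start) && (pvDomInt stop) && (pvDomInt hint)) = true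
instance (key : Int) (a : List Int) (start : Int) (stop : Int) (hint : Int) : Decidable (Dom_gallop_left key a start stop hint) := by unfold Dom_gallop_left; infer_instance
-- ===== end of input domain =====

-- B keeps A's probe sequence but is decomposed differently: one direction-parameterised counting loop over the closed-form
-- offsets 2^k - 1 replaces the two mirrored stateful gallop loops, and a recursive bisection replaces the iterative one.
-- Loops are ported with an explicit Nat fuel that provably exceeds each loop's iteration count (a totality guard only).

-- ===== PORT A =====
-- gallop-right loop: while ofs < maxofs: if a[hint+ofs] < key: lastofs, ofs = ofs, (ofs<<1)+1 (with overflow clamp) else break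
def pvGallopR (key : Int) (a : List Int) (hint maxofs : Int) (fuel : Nat) (lastofs ofs : Int) : Int × Int :=
  match fuel with
  | 0 => (lastofs, ofs)
  | fuel + 1 =>
    if ofs < maxofs then
      if PySem.List.pyGetD a (hint + ofs) 0 < key then
        -- lastofs = ofs; ofs = (ofs << 1) + 1; if ofs <= 0: ofs = maxofs
        pvGallopR key a hint maxofs fuel ofs (if 2 * ofs + 1 ≤ 0 then maxofs else 2 * ofs + 1)
      else (lastofs, ofs)
    else (lastofs, ofs)

-- gallop-left loop: while ofs < maxofs: if a[hint-ofs] < key: break else lastofs, ofs = ofs, (ofs<<1)+1 (with overflow clamp)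
def pvGallopL (key : Int) (a : List Int) (hint maxofs : Int) (fuel : Nat) (lastofs ofs : Int) : Int × Int :=
  match fuel with
  | 0 => (lastofs, ofs)
  | fuel + 1 =>
    if ofs < maxofs then
      if PySem.List.pyGetD a (hint - ofs) 0 < key then (lastofs, ofs)
      else
        -- lastofs = ofs; ofs = (ofs << 1) + 1; if ofs <= 0: ofs = maxofs
        pvGallopL key a hint maxofs fuel ofs (if 2 * ofs + 1 ≤ 0 then maxofs else 2 * ofs + 1)
    else (lastofs, ofs)

-- final bisection of A: while lastofs < ofs: m = lastofs + ((ofs-lastofs) >> 1); …; return ofs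
def pvBisectA (key : Int) (a : List Int) (fuel : Nat) (lastofs ofs : Int) : Int :=
  match fuel with
  | 0 => ofs
  | fuel + 1 =>
    if lastofs < ofs then
      let m := lastofs + PySem.Int.floordiv (ofs - lastofs) 2  -- (ofs - lastofs) >> 1
      if PySem.List.pyGetD a m 0 < key then pvBisectA key a fuel (m + 1) ofs
      else pvBisectA key a fuel lastofs m
    else ofs

def gallop_left (key : Int) (a : List Int) (start : Int) (stop : Int) (hint : Int) : Int :=
  -- the two asserts hold under Pre_; n = stop - start is unused by the rest of A's body
  let lo_hi :=
    if PySem.List.pyGetD a hint 0 < key then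
      let maxofs := stop - hint
      let lo := pvGallopR key a hint maxofs maxofs.toNat 0 1
      let o := if lo.2 > maxofs then maxofs else lo.2
      (lo.1 + hint, o + hint)
    else
      let maxofs := hint - start + 1
      let lo := pvGallopL key a hint maxofs maxofs.toNat 0 1
      let o := if lo.2 > maxofs then maxofs else lo.2
      (hint - o, hint - lo.1)
  pvBisectA key a ((lo_hi.2 - (lo_hi.1 + 1)).toNat + 1) (lo_hi.1 + 1) lo_hi.2

-- ===== PORT B =====
-- counting loop of B: while 2**(k+1)-1 < maxofs and (a[hint + d*(2**(k+1)-1)] < key) == (d == 1): k += 1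
def pvGallopK (key : Int) (a : List Int) (hint maxofs d : Int) (fuel : Nat) (k : Nat) : Nat :=
  match fuel with
  | 0 => k
  | fuel + 1 =>
    if (2:Int) ^ (k + 1) - 1 < maxofs ∧
       ((PySem.List.pyGetD a (hint + d * ((2:Int) ^ (k + 1) - 1)) 0 < key) ↔ d = 1) then
      pvGallopK key a hint maxofs d fuel (k + 1)
    else k

-- recursive bisection of B: bisect(lo, hi) = lo if lo >= hi else probe m = lo + (hi-lo)//2
def pvBisectB (key : Int) (a : List Int) (fuel : Nat) (lo hi : Int) : Int :=
  match fuel with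
  | 0 => lo
  | fuel + 1 =>
    if lo ≥ hi then lo
    else
      let m := lo + PySem.Int.floordiv (hi - lo) 2  -- (hi - lo) // 2
      if PySem.List.pyGetD a m 0 < key then pvBisectB key a fuel (m + 1) hi
      else pvBisectB key a fuel lo m

def gallop_left_alt (key : Int) (a : List Int) (start : Int) (stop : Int) (hint : Int) : Int :=
  -- the two asserts hold under Pre_
  let dm :=
    if PySem.List.pyGetD a hint 0 < key then ((1 : Int), stop - hint)
    else ((-1 : Int), hint - start + 1)
  let k := pvGallopK key a hint dm.2 dm.1 (dm.2.toNat + 2) 0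
  let last : Int := 2 ^ k - 1
  let ofs : Int := min (2 ^ (k + 1) - 1) dm.2
  let lo_hi :=
    if dm.1 = 1 then (hint + last + 1, hint + ofs)
    else (hint - ofs + 1, hint - last)
  pvBisectB key a ((lo_hi.2 - lo_hi.1).toNat + 1) lo_hi.1 lo_hi.2

-- ===== PRECONDITION & SPEC =====
-- Pre_ is where the Python returns: the two asserts hold and every index the probes can touch is in range
-- (start ≥ -len and hint < len; stop may pass the end only on the gallop-left side, i.e. when key ≤ a[hint]).
-- Excluded yet returning: right-gallops with stop past the end whose probes happen to stop before an
-- out-of-range index — a data-dependent accident no closed-form precondition separates from the IndexError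
-- cases; A and B behave identically there anyway (see the cite in claim.json).
def Pre_gallop_left (key : Int) (a : List Int) (start : Int) (stop : Int) (hint : Int) : Prop :=
  start < stop ∧ start ≤ hint ∧ hint < stop ∧
  -(a.length : Int) ≤ start ∧ hint < (a.length : Int) ∧
  (stop ≤ (a.length : Int) ∨ key ≤ PySem.List.pyGetD a hint 0)
instance (key : Int) (a : List Int) (start : Int) (stop : Int) (hint : Int) : Decidable (Pre_gallop_left key a start stop hint) := by unfold Pre_gallop_left; infer_instance

def pvWitness_gallop_left : Int × List Int × Int × Int × Int := (5, [1, 3, 5, 5, 7], 0, 5, 2)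

def Spec_gallop_left (key : Int) (a : List Int) (start : Int) (stop : Int) (hint : Int) (out : Int) : Prop := out = gallop_left_alt key a start stop hint
instance (key : Int) (a : List Int) (start : Int) (stop : Int) (hint : Int) (out : Int) : Decidable (Spec_gallop_left key a start stop hint out) := by unfold Spec_gallop_left; infer_instance

-- ===== CLAIM (what is proved, stated in full; the proofs are below) =====
def Claim_equal_gallop_left : Prop := ∀ (key : Int) (a : List Int) (start : Int) (stop : Int) (hint : Int), Dom_gallop_left key a start stop hint → Pre_gallop_left key a start stop hint → Spec_gallop_left key a start stop hint (gallop_left key a start stop hint)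

-- ===== LEMMAS AND PROOFS =====

-- the counting loop never counts past the window: 2^k - 1 stays below maxofs
lemma pvGallopK_lt (key : Int) (a : List Int) (hint maxofs d : Int) :
    ∀ fuel : Nat, ∀ j : Nat, (2:Int) ^ j - 1 < maxofs →
    (2:Int) ^ (pvGallopK key a hint maxofs d fuel j) - 1 < maxofs := by
  intro fuel
  induction fuel with
  | zero => intro j hj; exact hj
  | succ f ih =>
    intro j hj
    rw [pvGallopK]
    by_cases hcond : (2:Int) ^ (j + 1) - 1 < maxofs ∧
        ((PySem.List.pyGetD a (hint + d * ((2:Int) ^ (j + 1) - 1)) 0 < key) ↔ d = 1)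
    · rw [if_pos hcond]; exact ih (j + 1) hcond.1
    · rw [if_neg hcond]; exact hj

-- the gallop-right loop, started at offsets (2^j - 1, 2^(j+1) - 1), is the counting loop with d = 1
lemma pvGallopR_corr (key : Int) (a : List Int) (hint maxofs : Int) :
    ∀ fA : Nat, ∀ fK : Nat, ∀ j : Nat,
    (maxofs - ((2:Int) ^ (j + 1) - 1)).toNat < fA → (maxofs - ((2:Int) ^ (j + 1) - 1)).toNat < fK →
    pvGallopR key a hint maxofs fA ((2:Int) ^ j - 1) ((2:Int) ^ (j + 1) - 1)
      = ((2:Int) ^ (pvGallopK key a hint maxofs 1 fK j) - 1,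
         (2:Int) ^ (pvGallopK key a hint maxofs 1 fK j + 1) - 1) := by
  intro fA
  induction fA with
  | zero => intro fK j h1; omega
  | succ f ih =>
    intro fK j h1 h2
    obtain ⟨g, rfl⟩ : ∃ g, fK = g + 1 := ⟨fK - 1, by omega⟩
    have hidx : hint + 1 * ((2:Int) ^ (j + 1) - 1) = hint + ((2:Int) ^ (j + 1) - 1) := by ring
    rw [pvGallopR, pvGallopK]
    by_cases hm : (2:Int) ^ (j + 1) - 1 < maxofs
    · rw [if_pos hm]
      by_cases hc : PySem.List.pyGetD a (hint + ((2:Int) ^ (j + 1) - 1)) 0 < key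
      · have hcond : (2:Int) ^ (j + 1) - 1 < maxofs ∧
            ((PySem.List.pyGetD a (hint + 1 * ((2:Int) ^ (j + 1) - 1)) 0 < key) ↔ (1:Int) = 1) :=
          ⟨hm, by rw [hidx]; exact iff_of_true hc rfl⟩
        rw [if_pos hc, if_pos hcond]
        have hp : (0:Int) < 2 ^ (j + 1) := pow_pos (by norm_num) _
        have hz : ¬ (2 * ((2:Int) ^ (j + 1) - 1) + 1 ≤ 0) := by omega
        rw [if_neg hz]
        have he : 2 * ((2:Int) ^ (j + 1) - 1) + 1 = (2:Int) ^ (j + 1 + 1) - 1 := by ring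
        rw [he]
        have hp2 : (0:Int) < 2 ^ (j + 1 + 1) := pow_pos (by norm_num) _
        have hlt : (2:Int) ^ (j + 1) < 2 ^ (j + 1 + 1) := by
          have : (2:Int) ^ (j + 1 + 1) = 2 ^ (j + 1) * 2 := by ring
          omega
        exact ih g (j + 1) (by omega) (by omega)
      · have hcond : ¬ ((2:Int) ^ (j + 1) - 1 < maxofs ∧
            ((PySem.List.pyGetD a (hint + 1 * ((2:Int) ^ (j + 1) - 1)) 0 < key) ↔ (1:Int) = 1)) := by
          rw [hidx]; exact fun hand => hc (hand.2.mpr rfl)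
        rw [if_neg hc, if_neg hcond]
    · rw [if_neg hm, if_neg (fun hand => hm hand.1)]

-- the gallop-left loop, started at offsets (2^j - 1, 2^(j+1) - 1), is the counting loop with d = -1
lemma pvGallopL_corr (key : Int) (a : List Int) (hint maxofs : Int) :
    ∀ fA : Nat, ∀ fK : Nat, ∀ j : Nat,
    (maxofs - ((2:Int) ^ (j + 1) - 1)).toNat < fA → (maxofs - ((2:Int) ^ (j + 1) - 1)).toNat < fK →
    pvGallopL key a hint maxofs fA ((2:Int) ^ j - 1) ((2:Int) ^ (j + 1) - 1)
      = ((2:Int) ^ (pvGallopK key a hint maxofs (-1) fK j) - 1,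
         (2:Int) ^ (pvGallopK key a hint maxofs (-1) fK j + 1) - 1) := by
  intro fA
  induction fA with
  | zero => intro fK j h1; omega
  | succ f ih =>
    intro fK j h1 h2
    obtain ⟨g, rfl⟩ : ∃ g, fK = g + 1 := ⟨fK - 1, by omega⟩
    have hidx : hint + (-1) * ((2:Int) ^ (j + 1) - 1) = hint - ((2:Int) ^ (j + 1) - 1) := by ring
    have hne : ¬ ((-1 : Int) = 1) := by norm_num
    rw [pvGallopL, pvGallopK]
    by_cases hm : (2:Int) ^ (j + 1) - 1 < maxofs
    · rw [if_pos hm]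
      by_cases hc : PySem.List.pyGetD a (hint - ((2:Int) ^ (j + 1) - 1)) 0 < key
      · have hcond : ¬ ((2:Int) ^ (j + 1) - 1 < maxofs ∧
            ((PySem.List.pyGetD a (hint + (-1) * ((2:Int) ^ (j + 1) - 1)) 0 < key) ↔ (-1:Int) = 1)) := by
          rw [hidx]; exact fun hand => hne (hand.2.mp hc)
        rw [if_pos hc, if_neg hcond]
      · have hcond : (2:Int) ^ (j + 1) - 1 < maxofs ∧
            ((PySem.List.pyGetD a (hint + (-1) * ((2:Int) ^ (j + 1) - 1)) 0 < key) ↔ (-1:Int) = 1) :=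
          ⟨hm, by rw [hidx]; exact ⟨fun h => absurd h hc, fun h => absurd h hne⟩⟩
        rw [if_neg hc, if_pos hcond]
        have hp : (0:Int) < 2 ^ (j + 1) := pow_pos (by norm_num) _
        have hz : ¬ (2 * ((2:Int) ^ (j + 1) - 1) + 1 ≤ 0) := by omega
        rw [if_neg hz]
        have he : 2 * ((2:Int) ^ (j + 1) - 1) + 1 = (2:Int) ^ (j + 1 + 1) - 1 := by ring
        rw [he]
        have hp2 : (0:Int) < 2 ^ (j + 1 + 1) := pow_pos (by norm_num) _
        have hlt : (2:Int) ^ (j + 1) < 2 ^ (j + 1 + 1) := by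
          have : (2:Int) ^ (j + 1 + 1) = 2 ^ (j + 1) * 2 := by ring
          omega
        exact ih g (j + 1) (by omega) (by omega)
    · rw [if_neg hm, if_neg (fun hand => hm hand.1)]

-- A's bisection loop and B's recursive bisection are the same recursion (any two sufficient fuels)
lemma pvBisect_corr (key : Int) (a : List Int) :
    ∀ fA fB : Nat, ∀ lo hi : Int, (hi - lo).toNat < fA → (hi - lo).toNat < fB →
    lo ≤ hi → pvBisectA key a fA lo hi = pvBisectB key a fB lo hi := by
  intro fA
  induction fA with
  | zero => intro fB lo hi hn; omega
  | succ f ih =>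
    intro fB lo hi hn1 hn2 hle
    obtain ⟨g, rfl⟩ : ∃ g, fB = g + 1 := ⟨fB - 1, by omega⟩
    rw [pvBisectA, pvBisectB]
    by_cases hlt : lo < hi
    · rw [if_pos hlt, if_neg (by omega : ¬ lo ≥ hi)]
      have hq1 := PySem.Int.floordiv_mul_add_mod (hi - lo) 2
      have hq2 := PySem.Int.mod_nonneg (hi - lo) (b := 2) (by norm_num)
      have hq3 := PySem.Int.mod_lt (hi - lo) (b := 2) (by norm_num)
      set m := lo + PySem.Int.floordiv (hi - lo) 2 with hm
      by_cases hc : PySem.List.pyGetD a m 0 < key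
      · rw [if_pos hc, if_pos hc]
        exact ih g (m + 1) hi (by omega) (by omega) (by omega)
      · rw [if_neg hc, if_neg hc]
        exact ih g lo m (by omega) (by omega) (by omega)
    · rw [if_neg hlt, if_pos (by omega : lo ≥ hi)]
      omega

-- ===== VERDICT (by name: the statement is the Claim_ definition above) =====
theorem gallop_left_spec : Claim_equal_gallop_left := by
  intro key a start stop hint _ hp
  obtain ⟨h1, h2, h3, -, -, -⟩ := hp
  unfold Spec_gallop_left
  have h20 : (2:Int) ^ 0 - 1 = 0 := by norm_num
  have h21 : (2:Int) ^ (0 + 1) - 1 = 1 := by norm_num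
  by_cases hc : PySem.List.pyGetD a hint 0 < key
  · -- right gallop: d = 1, maxofs = stop - hint ≥ 1
    simp only [gallop_left, gallop_left_alt, if_pos hc]
    set maxofs := stop - hint with hmx
    have hmx1 : 1 ≤ maxofs := by omega
    set K := pvGallopK key a hint maxofs 1 (maxofs.toNat + 2) 0 with hK
    have hcorr := pvGallopR_corr key a hint maxofs maxofs.toNat (maxofs.toNat + 2) 0
      (by rw [h21]; omega) (by rw [h21]; omega)
    rw [h20, h21] at hcorr
    rw [hcorr, ← hK]
    simp only []
    have hpK : (0:Int) < 2 ^ K := pow_pos (by norm_num) _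
    have hpK1 : (2:Int) ^ (K + 1) = 2 ^ K * 2 := by ring
    have hKlt : (2:Int) ^ K - 1 < maxofs := by
      rw [hK]; exact pvGallopK_lt key a hint maxofs 1 (maxofs.toNat + 2) 0 (by rw [h20]; omega)
    have hclamp : (if (2:Int) ^ (K + 1) - 1 > maxofs then maxofs
        else (2:Int) ^ (K + 1) - 1) = min ((2:Int) ^ (K + 1) - 1) maxofs := by
      by_cases h : (2:Int) ^ (K + 1) - 1 > maxofs
      · rw [if_pos h, min_eq_right (le_of_lt h)]
      · rw [if_neg h, min_eq_left (by omega)]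
    rw [hclamp]
    have hmin1 : (2:Int) ^ K - 1 < min ((2:Int) ^ (K + 1) - 1) maxofs := by
      rcases le_total ((2:Int) ^ (K + 1) - 1) maxofs with h | h
      · rw [min_eq_left h]; omega
      · rw [min_eq_right h]; omega
    have e1 : ((2:Int) ^ K - 1 + hint + 1) = (hint + ((2:Int) ^ K - 1) + 1) := by ring
    have e2 : min ((2:Int) ^ (K + 1) - 1) maxofs + hint = hint + min ((2:Int) ^ (K + 1) - 1) maxofs := by ring
    rw [e1, e2]
    simp only [if_true]
    refine pvBisect_corr key a _ _ _ _ ?_ ?_ ?_ <;> omega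
  · -- left gallop: d = -1, maxofs = hint - start + 1 ≥ 1
    simp only [gallop_left, gallop_left_alt, if_neg hc]
    set maxofs := hint - start + 1 with hmx
    have hmx1 : 1 ≤ maxofs := by omega
    set K := pvGallopK key a hint maxofs (-1) (maxofs.toNat + 2) 0 with hK
    have hcorr := pvGallopL_corr key a hint maxofs maxofs.toNat (maxofs.toNat + 2) 0
      (by rw [h21]; omega) (by rw [h21]; omega)
    rw [h20, h21] at hcorr
    rw [hcorr, ← hK]
    simp only []
    have hpK : (0:Int) < 2 ^ K := pow_pos (by norm_num) _
    have hpK1 : (2:Int) ^ (K + 1) = 2 ^ K * 2 := by ring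
    have hKlt : (2:Int) ^ K - 1 < maxofs := by
      rw [hK]; exact pvGallopK_lt key a hint maxofs (-1) (maxofs.toNat + 2) 0 (by rw [h20]; omega)
    have hclamp : (if (2:Int) ^ (K + 1) - 1 > maxofs then maxofs
        else (2:Int) ^ (K + 1) - 1) = min ((2:Int) ^ (K + 1) - 1) maxofs := by
      by_cases h : (2:Int) ^ (K + 1) - 1 > maxofs
      · rw [if_pos h, min_eq_right (le_of_lt h)]
      · rw [if_neg h, min_eq_left (by omega)]
    rw [hclamp]
    have hmin1 : (2:Int) ^ K - 1 < min ((2:Int) ^ (K + 1) - 1) maxofs := by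
      rcases le_total ((2:Int) ^ (K + 1) - 1) maxofs with h | h
      · rw [min_eq_left h]; omega
      · rw [min_eq_right h]; omega
    rw [if_neg (show ¬((-1:Int) = 1) by norm_num)]
    simp only []
    refine pvBisect_corr key a _ _ _ _ ?_ ?_ ?_ <;> omega
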